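-- pv_equiv track=rewrite | github.com/SeredaVladislav/Repository_my_PC | More/Задачки_собес.py | calculation
-- ===== SOURCE A (Python) =====
-- ALPHABET = 'DU'  # разрешенные символы
--
-- def calculation(x: str) -> (str, int):
--     sea_level = 0  # уровень моря
--     peak = 0  # кол-во преодоленных вершин
--     pit = 0  # кол-во преодоленных впадин
--
--     for i in x:
--         if i not in ALPHABET:
--             raise TypeError("Неверно введено значение: Введите вершину(U, u) и\или впадину(D, d)")
--         if i in 'U':
--             sea_level += 1
--             if sea_level > 0 and not sea_level > 1:
--                 peak += 1
--         if i in 'D':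
--             sea_level -= 1
--             if sea_level < 0 and not sea_level < -1:
--                 pit += 1
--     return f"Вершины преодолены: {peak}\nНизины преодолены: {pit}"
-- ===== SOURCE B (Python) =====
-- ALPHABET = 'DU'  # разрешенные символы
--
-- def calculation(x: str) -> (str, int):
--     if any(c not in ALPHABET for c in x):
--         raise TypeError("Неверно введено значение: Введите вершину(U, u) и\или впадину(D, d)")
--     # prefix sums of the +1/-1 deltas = running sea levels
--     levels = []
--     lvl = 0
--     for c in x:
--         lvl += 1 if c == 'U' else -1
--         levels.append(lvl)
--     pairs = list(zip([0] + levels, levels))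
--     peak = sum(1 for prev, cur in pairs if prev == 0 and cur == 1)
--     pit = sum(1 for prev, cur in pairs if prev == 0 and cur == -1)
--     return f"Вершины преодолены: {peak}\nНизины преодолены: {pit}"
-- ===== Notes on version B (the rewrite author's own statement) =====
-- stated objective: alternative
-- what changed: B validates all characters up front, builds the list of running sea levels as a prefix sum, and counts 0->1 and 0->-1 transitions over zipped adjacent pairs, instead of A's single fused loop that updates peak/pit inline with nested conditionals.
import Mathlib
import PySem

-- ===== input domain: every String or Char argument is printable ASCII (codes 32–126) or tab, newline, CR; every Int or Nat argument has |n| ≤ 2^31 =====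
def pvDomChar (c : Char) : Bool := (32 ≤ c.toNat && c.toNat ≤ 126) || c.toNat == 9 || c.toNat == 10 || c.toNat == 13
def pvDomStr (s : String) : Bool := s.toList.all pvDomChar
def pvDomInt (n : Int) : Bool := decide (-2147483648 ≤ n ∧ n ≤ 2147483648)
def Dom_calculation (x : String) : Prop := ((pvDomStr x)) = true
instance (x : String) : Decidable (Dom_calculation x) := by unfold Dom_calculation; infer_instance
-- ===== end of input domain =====

-- B separates validation, a prefix-sum pass building the running sea levels, and
-- two transition-counting passes, instead of A's single fused loop (alternative decomposition).

-- ===== PORT A =====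
-- A's fused loop: state (sea_level, peak, pit); 'none' = the TypeError raise on a char not in 'DU'.
def aLoop : List Char → Int → Int → Int → Option (Int × Int × Int)
  | [], lvl, pk, pt => some (lvl, pk, pt)
  | c :: rest, lvl, pk, pt =>
    if c ≠ 'D' ∧ c ≠ 'U' then none
    else
      let lvl1 := if c = 'U' then lvl + 1 else lvl
      let pk1  := if c = 'U' ∧ lvl1 > 0 ∧ ¬ lvl1 > 1 then pk + 1 else pk
      let lvl2 := if c = 'D' then lvl1 - 1 else lvl1
      let pt1  := if c = 'D' ∧ lvl2 < 0 ∧ ¬ lvl2 < -1 then pt + 1 else pt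
      aLoop rest lvl2 pk1 pt1

def calculation (x : String) : String :=
  match aLoop x.toList 0 0 0 with
  | none => ""  -- unreachable under Pre_: A raises TypeError here
  | some (_, pk, pt) =>
      "Вершины преодолены: " ++ PySem.Int.toStr pk ++ "\nНизины преодолены: " ++ PySem.Int.toStr pt

-- ===== PORT B =====
-- running sea levels (prefix sums of the +1/-1 deltas)
def bLevels : Int → List Char → List Int
  | _, [] => []
  | lvl, c :: rest =>
    let l := lvl + (if c = 'U' then 1 else -1)
    l :: bLevels l rest

-- number of adjacent pairs (prev, cur) with prev = 0 and cur = t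
def bCount (t : Int) (ps : List (Int × Int)) : Int :=
  ((ps.filter (fun p => p.1 == 0 && p.2 == t)).length : Int)

def calculation_alt (x : String) : String :=
  if x.toList.all (fun c => c == 'D' || c == 'U') then
    let ls := bLevels 0 x.toList
    let ps := List.zip (0 :: ls) ls
    "Вершины преодолены: " ++ PySem.Int.toStr (bCount 1 ps) ++
      "\nНизины преодолены: " ++ PySem.Int.toStr (bCount (-1) ps)
  else ""  -- unreachable under Pre_: B raises TypeError here

-- ===== PRECONDITION & SPEC =====
-- A raises TypeError on any character other than 'D'/'U'; Pre_ admits exactly the inputs A returns on.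
def Pre_calculation (x : String) : Prop := (x.toList.all (fun c => c == 'D' || c == 'U')) = true
instance (x : String) : Decidable (Pre_calculation x) := by unfold Pre_calculation; infer_instance
def pvWitness_calculation : String := "UD"

def Spec_calculation (x : String) (out : String) : Prop := out = calculation_alt x
instance (x : String) (out : String) : Decidable (Spec_calculation x out) := by unfold Spec_calculation; infer_instance

-- ===== CLAIM (what is proved, stated in full; the proofs are below) =====
def Claim_equal_calculation : Prop := ∀ (x : String), Dom_calculation x → Pre_calculation x → Spec_calculation x (calculation x)

-- ===== LEMMAS AND PROOFS =====
theorem bCount_cons (t a b : Int) (ps : List (Int × Int)) :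
    bCount t ((a, b) :: ps) = (if a = 0 ∧ b = t then 1 else 0) + bCount t ps := by
  simp only [bCount, List.filter]
  by_cases h : a = 0 ∧ b = t
  · simp [h]; omega
  · have : ¬ (a == 0 && b == t) = true := by
      simp only [Bool.and_eq_true, beq_iff_eq]; exact h
    simp [this, h]

theorem aLoop_eq (cs : List Char) : ∀ lvl pk pt : Int, (∀ c ∈ cs, c = 'D' ∨ c = 'U') →
    ∃ l, aLoop cs lvl pk pt =
      some (l, pk + bCount 1 (List.zip (lvl :: bLevels lvl cs) (bLevels lvl cs)),
               pt + bCount (-1) (List.zip (lvl :: bLevels lvl cs) (bLevels lvl cs))) := by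
  induction cs with
  | nil => intro lvl pk pt _; exact ⟨lvl, by simp [aLoop, bLevels, bCount]⟩
  | cons c rest ih =>
    intro lvl pk pt hall
    have hc : c = 'D' ∨ c = 'U' := hall c (List.mem_cons_self)
    have hrest : ∀ c ∈ rest, c = 'D' ∨ c = 'U' := fun d hd => hall d (List.mem_cons_of_mem _ hd)
    rcases hc with hc | hc
    · -- c = 'D'
      subst hc
      obtain ⟨l, hl⟩ := ih (lvl - 1) pk (if lvl - 1 < 0 ∧ ¬ lvl - 1 < -1 then pt + 1 else pt) hrest
      refine ⟨l, ?_⟩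
      simp only [List.zip] at hl
      simp only [aLoop, bLevels, List.zip,
        show (('D' : Char) = 'U') = False from by simp, if_true, if_false, true_and, false_and]
      rw [show (lvl + -1 : Int) = lvl - 1 from by ring]
      rw [hl, if_neg (show ¬(('D' : Char) ≠ 'D' ∧ ('D' : Char) ≠ 'U') from by simp)]
      simp only [List.zipWith_cons_cons, bCount_cons, Option.some.injEq, Prod.mk.injEq]
      refine ⟨trivial, ?_, ?_⟩ <;> split_ifs <;> omega
    · -- c = 'U'
      subst hc
      obtain ⟨l, hl⟩ := ih (lvl + 1) (if lvl + 1 > 0 ∧ ¬ lvl + 1 > 1 then pk + 1 else pk) pt hrest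
      refine ⟨l, ?_⟩
      simp only [List.zip] at hl
      simp only [aLoop, bLevels, List.zip,
        show (('U' : Char) = 'D') = False from by simp, if_true, if_false, true_and, false_and]
      rw [hl, if_neg (show ¬(('U' : Char) ≠ 'D' ∧ ('U' : Char) ≠ 'U') from by simp)]
      simp only [List.zipWith_cons_cons, bCount_cons, Option.some.injEq, Prod.mk.injEq]
      refine ⟨trivial, ?_, ?_⟩ <;> split_ifs <;> omega

-- ===== VERDICT (by name: the statement is the Claim_ definition above) =====
theorem calculation_spec : Claim_equal_calculation := by
  intro x _ hpre
  unfold Pre_calculation at hpre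
  have hpre' : ∀ c ∈ x.toList, c = 'D' ∨ c = 'U' := by
    simpa only [List.all_eq_true, Bool.or_eq_true, beq_iff_eq] using hpre
  unfold Spec_calculation calculation calculation_alt
  rw [if_pos hpre]
  obtain ⟨l, hl⟩ := aLoop_eq x.toList 0 0 0 hpre'
  rw [hl]
  simp
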